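-- pv_equiv track=rewrite | github.com/LifengFan/Triadic-Belief-Dynamics | src/feature_segment_two_level.py | id2labels
-- ===== SOURCE A (Python) =====
-- def id2labels(idx, length):
--     labels = []
--     labels.append([0])
--     counter = 0
--     for i in range(1, length):
--         if idx[i] != idx[i - 1]:
--             labels[counter].extend([i - 1, idx[i - 1]])
--             labels.append([i])
--             counter += 1
--     if len(labels[counter]) < 2:
--         labels[counter].extend([length - 1, idx[length - 1]])
--     return labels
-- ===== SOURCE B (Python) =====
-- def id2labels(idx, length):
--     boundaries = [i for i in range(1, length) if idx[i] != idx[i - 1]]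
--     starts = [0] + boundaries
--     segs = [[s, e - 1, idx[e - 1]] for s, e in zip(starts, boundaries)]
--     segs.append([starts[-1], length - 1, idx[length - 1]])
--     return segs
-- ===== Notes on version B (the rewrite author's own statement) =====
-- stated objective: alternative
-- what changed: A interleaves opening, extending and closing segments in one stateful pass with a counter into the growing labels list; B first collects the boundary indices with a filter, then materializes each closed segment by zipping consecutive starts and appends the final segment separately.
import Mathlib
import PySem

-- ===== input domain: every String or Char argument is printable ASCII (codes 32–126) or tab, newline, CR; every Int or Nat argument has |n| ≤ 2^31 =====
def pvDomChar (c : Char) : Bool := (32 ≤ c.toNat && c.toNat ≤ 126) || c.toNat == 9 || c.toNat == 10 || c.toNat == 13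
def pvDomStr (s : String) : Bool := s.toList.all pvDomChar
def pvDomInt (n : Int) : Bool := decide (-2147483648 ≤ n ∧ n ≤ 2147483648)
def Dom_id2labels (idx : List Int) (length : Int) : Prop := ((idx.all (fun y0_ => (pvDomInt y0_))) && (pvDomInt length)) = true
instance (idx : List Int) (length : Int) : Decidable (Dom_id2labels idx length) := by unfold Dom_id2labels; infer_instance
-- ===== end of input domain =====

-- B replaces A's interleaved open/extend/append single pass with a two-phase
-- find-boundaries-then-materialize computation (objective: alternative decomposition).

-- ===== PORT A =====
-- loop body of A's 'for i in range(1, length)': labels[counter].extend([i-1, idx[i-1]]);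
-- labels.append([i]); counter += 1 when idx[i] != idx[i-1].  idx[_] is ported with
-- pyGetD; Pre_ guarantees every index A touches is in range, so this is exact there.
def pvStepA (idx : List Int) (st : List (List Int) × Nat) (i : Int) : List (List Int) × Nat :=
  if PySem.List.pyGetD idx i 0 ≠ PySem.List.pyGetD idx (i - 1) 0 then
    ((st.1.set st.2 ((st.1.getD st.2 []) ++ [i - 1, PySem.List.pyGetD idx (i - 1) 0])) ++ [[i]],
      st.2 + 1)
  else st

def id2labels (idx : List Int) (length : Int) : List (List Int) :=
  let st := (PySem.List.pyRange 1 length 1).foldl (pvStepA idx) ([[0]], 0)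
  if (st.1.getD st.2 []).length < 2 then
    st.1.set st.2 ((st.1.getD st.2 []) ++ [length - 1, PySem.List.pyGetD idx (length - 1) 0])
  else st.1

-- ===== PORT B =====
def id2labels_alt (idx : List Int) (length : Int) : List (List Int) :=
  let boundaries := (PySem.List.pyRange 1 length 1).filter
    (fun i => decide (PySem.List.pyGetD idx i 0 ≠ PySem.List.pyGetD idx (i - 1) 0))
  let starts := [0] ++ boundaries
  let segs := (starts.zip boundaries).map
    (fun p => [p.1, p.2 - 1, PySem.List.pyGetD idx (p.2 - 1) 0])
  segs ++ [[PySem.List.pyGetD starts (-1) 0, length - 1, PySem.List.pyGetD idx (length - 1) 0]]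

-- ===== PRECONDITION & SPEC =====
-- Pre_ excludes exactly the inputs on which Python A raises IndexError:
-- length > len(idx), or length < 1 - len(idx) (the final idx[length-1] wraps past the front).
def Pre_id2labels (idx : List Int) (length : Int) : Prop :=
  length ≤ (idx.length : Int) ∧ 1 - (idx.length : Int) ≤ length

instance (idx : List Int) (length : Int) : Decidable (Pre_id2labels idx length) := by
  unfold Pre_id2labels; infer_instance

def pvWitness_id2labels : List Int × Int := ([0, 0, 1], 3)

def Spec_id2labels (idx : List Int) (length : Int) (out : List (List Int)) : Prop :=
  out = id2labels_alt idx length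
instance (idx : List Int) (length : Int) (out : List (List Int)) : Decidable (Spec_id2labels idx length out) := by unfold Spec_id2labels; infer_instance

-- ===== CLAIM (what is proved, stated in full; the proofs are below) =====
def Claim_equal_id2labels : Prop := ∀ (idx : List Int) (length : Int), Dom_id2labels idx length → Pre_id2labels idx length → Spec_id2labels idx length (id2labels idx length)

-- ===== LEMMAS AND PROOFS =====

-- the closed segments produced for start s and boundary list bs (B's zip formulation)
def pvSegs (idx : List Int) (s : Int) (bs : List Int) : List (List Int) :=
  ((s :: bs).zip bs).map (fun p => [p.1, p.2 - 1, PySem.List.pyGetD idx (p.2 - 1) 0])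

lemma pvSegs_cons (idx : List Int) (s b : Int) (bs : List Int) :
    pvSegs idx s (b :: bs) =
      [s, b - 1, PySem.List.pyGetD idx (b - 1) 0] :: pvSegs idx b bs := by
  simp [pvSegs]

lemma pvSegs_length (idx : List Int) (s : Int) (bs : List Int) :
    (pvSegs idx s bs).length = bs.length := by
  simp [pvSegs]

lemma getD_append_singleton {α : Type} (l : List α) (x d : α) :
    (l ++ [x]).getD l.length d = x := by
  induction l with
  | nil => rfl
  | cons a t ih => simp

lemma set_append_singleton {α : Type} (l : List α) (x y : α) :
    (l ++ [x]).set l.length y = l ++ [y] := by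
  induction l with
  | nil => rfl
  | cons a t ih => simp [ih]

-- loop invariant: A's fold, started on 'closed' finished segments plus one open
-- segment [s0], produces exactly B's segments for the boundaries found in rng.
lemma foldA_spec (idx : List Int) (rng : List Int) (closed : List (List Int)) (s0 : Int) :
    rng.foldl (pvStepA idx) (closed ++ [[s0]], closed.length) =
      (closed ++
        pvSegs idx s0 (rng.filter (fun i => decide (PySem.List.pyGetD idx i 0 ≠ PySem.List.pyGetD idx (i - 1) 0))) ++
        [[(rng.filter (fun i => decide (PySem.List.pyGetD idx i 0 ≠ PySem.List.pyGetD idx (i - 1) 0))).getLastD s0]],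
       closed.length + (rng.filter (fun i => decide (PySem.List.pyGetD idx i 0 ≠ PySem.List.pyGetD idx (i - 1) 0))).length) := by
  induction rng generalizing closed s0 with
  | nil => simp [pvSegs]
  | cons i rest ih =>
    by_cases h : PySem.List.pyGetD idx i 0 ≠ PySem.List.pyGetD idx (i - 1) 0
    · have hstep : pvStepA idx (closed ++ [[s0]], closed.length) i =
          ((closed ++ [[s0, i - 1, PySem.List.pyGetD idx (i - 1) 0]]) ++ [[i]],
           (closed ++ [[s0, i - 1, PySem.List.pyGetD idx (i - 1) 0]]).length) := by
        simp only [pvStepA, if_pos h, getD_append_singleton, set_append_singleton]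
        simp
      rw [List.foldl_cons, hstep, ih,
        List.filter_cons_of_pos (by simpa using h), pvSegs_cons, List.getLastD_cons]
      simp [List.append_assoc]
      omega
    · have hstep : pvStepA idx (closed ++ [[s0]], closed.length) i =
          (closed ++ [[s0]], closed.length) := by
        simp [pvStepA, h]
      rw [List.foldl_cons, hstep, ih, List.filter_cons_of_neg (by simpa using h)]

theorem id2labels_spec : Claim_equal_id2labels := by
  intro idx length _ _
  unfold Spec_id2labels id2labels id2labels_alt
  have h := foldA_spec idx (PySem.List.pyRange 1 length 1) [] 0
  simp only [List.nil_append, List.length_nil] at h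
  rw [h]
  set bs := (PySem.List.pyRange 1 length 1).filter
    (fun i => decide (PySem.List.pyGetD idx i 0 ≠ PySem.List.pyGetD idx (i - 1) 0)) with hbs
  have hlen : (pvSegs idx 0 bs).length = bs.length := pvSegs_length idx 0 bs
  simp only [Nat.zero_add]
  rw [← hlen, getD_append_singleton, set_append_singleton]
  have hlast : PySem.List.pyGetD ((0:Int) :: bs) (-1) 0 = bs.getLastD 0 := by
    simp [PySem.List.pyGetD, PySem.List.pyGet?_neg_one, List.getLast?_cons]
  simp only [List.cons_append, List.nil_append, pvSegs, hlast]
  simp
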